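-- pv_equiv track=rewrite | github.com/quic/efficient-transformers | tests/transformers/models/image_text_to_text/test_reranker_mad.py | _truncate_tokens_optimized
-- ===== SOURCE A (Python) =====
-- from typing import Dict, List, Tuple
--
-- def _truncate_tokens_optimized(tokens: List[int], max_length: int, special_tokens: List[int]) -> List[int]:
--     if len(tokens) <= max_length:
--         return tokens
--
--     special_tokens_set = set(special_tokens)
--     num_special = sum(1 for token in tokens if token in special_tokens_set)
--     num_non_special_to_keep = max_length - num_special
--
--     final_tokens = []
--     non_special_kept_count = 0
--     for token in tokens:
--         if token in special_tokens_set: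
--             final_tokens.append(token)
--         elif non_special_kept_count < num_non_special_to_keep:
--             final_tokens.append(token)
--             non_special_kept_count += 1
--     return final_tokens
-- ===== SOURCE B (Python) =====
-- from typing import Dict, List, Tuple
--
-- def _truncate_tokens_optimized(tokens: List[int], max_length: int, special_tokens: List[int]) -> List[int]:
--     if len(tokens) <= max_length:
--         return tokens
--
--     special_tokens_set = set(special_tokens)
--     # positions of the non-special tokens, in order
--     ns = [i for i, t in enumerate(tokens) if t not in special_tokens_set]
--     # we must drop exactly len(tokens) - max_length non-specials (all of them if fewer)
--     keep = max(0, len(ns) - (len(tokens) - max_length))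
--     cutoff = ns[keep] if keep < len(ns) else len(tokens)
--     # everything before the cutoff position survives; from the cutoff on, only specials do
--     return [t for i, t in enumerate(tokens) if i < cutoff or t in special_tokens_set]
-- ===== Notes on version B (the rewrite author's own statement) =====
-- stated objective: alternative
-- what changed: Instead of A's single stateful pass that counts specials and then keeps the first (max_length - num_special) non-specials with a running counter, B first collects the positions of the non-special tokens, computes from them a single cutoff position, and returns the tokens whose index is below the cutoff plus the specials after it, via two index-based comprehensions with no running kept-counter.
import Mathlib
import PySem

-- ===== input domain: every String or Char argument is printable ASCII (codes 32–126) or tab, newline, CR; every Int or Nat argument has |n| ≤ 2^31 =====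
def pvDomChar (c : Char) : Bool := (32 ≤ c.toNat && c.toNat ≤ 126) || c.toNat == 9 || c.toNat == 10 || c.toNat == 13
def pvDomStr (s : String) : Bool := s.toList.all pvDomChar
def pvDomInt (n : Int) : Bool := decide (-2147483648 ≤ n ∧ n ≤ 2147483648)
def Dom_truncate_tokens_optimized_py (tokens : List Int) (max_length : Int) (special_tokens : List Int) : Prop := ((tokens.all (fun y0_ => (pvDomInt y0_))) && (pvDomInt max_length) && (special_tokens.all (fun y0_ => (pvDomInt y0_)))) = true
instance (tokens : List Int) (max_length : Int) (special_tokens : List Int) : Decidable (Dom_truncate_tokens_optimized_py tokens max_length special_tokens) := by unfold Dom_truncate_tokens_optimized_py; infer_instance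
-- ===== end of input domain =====

-- B replaces A's stateful keep-counter pass by a cutoff position computed from the indices of the
-- non-special tokens, then filters by index; equivalence is about the return VALUE
-- (both early paths return the argument itself).

-- ===== PORT A =====
-- literal transliteration of _truncate_tokens_optimized (Source A)
def truncate_tokens_optimized_py (tokens : List Int) (max_length : Int) (special_tokens : List Int) : List Int :=
  if (tokens.length : Int) ≤ max_length then tokens
  else
    let sset : PySem.Set Int := PySem.Set.ofList special_tokens
    let num_special : Int := tokens.foldl (fun acc token => if PySem.Set.contains sset token then acc + 1 else acc) 0
    let num_non_special_to_keep : Int := max_length - num_special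
    -- for-loop with state (final_tokens, non_special_kept_count)
    (tokens.foldl (fun (st : List Int × Int) token =>
        if PySem.Set.contains sset token then (st.1 ++ [token], st.2)
        else if st.2 < num_non_special_to_keep then (st.1 ++ [token], st.2 + 1)
        else st) ([], 0)).1

-- ===== PORT B =====
-- literal transliteration of Source B: cutoff index from the list of non-special positions, then
-- filter by index.  'ns[keep]' is guarded by 'keep < len(ns)' in Source B, so pyGet? is in range
-- and '.getD 0' never supplies the default.
def truncate_tokens_optimized_py_alt (tokens : List Int) (max_length : Int) (special_tokens : List Int) : List Int :=
  if (tokens.length : Int) ≤ max_length then tokens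
  else
    let sset : PySem.Set Int := PySem.Set.ofList special_tokens
    let ns : List Int :=
      ((PySem.List.enumerate tokens).filter (fun it => !PySem.Set.contains sset it.2)).map (fun it => it.1)
    let keep : Int := max 0 ((ns.length : Int) - ((tokens.length : Int) - max_length))
    let cutoff : Int :=
      if keep < (ns.length : Int) then (PySem.List.pyGet? ns keep).getD 0 else (tokens.length : Int)
    ((PySem.List.enumerate tokens).filter
        (fun it => decide (it.1 < cutoff) || PySem.Set.contains sset it.2)).map (fun it => it.2)

-- ===== PRECONDITION & SPEC =====
def Spec_truncate_tokens_optimized_py (tokens : List Int) (max_length : Int) (special_tokens : List Int) (out : List Int) : Prop := out = truncate_tokens_optimized_py_alt tokens max_length special_tokens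
instance (tokens : List Int) (max_length : Int) (special_tokens : List Int) (out : List Int) : Decidable (Spec_truncate_tokens_optimized_py tokens max_length special_tokens out) := by unfold Spec_truncate_tokens_optimized_py; infer_instance

-- ===== CLAIM =====
def Claim_equal_truncate_tokens_optimized_py : Prop := ∀ (tokens : List Int) (max_length : Int) (special_tokens : List Int), Dom_truncate_tokens_optimized_py tokens max_length special_tokens → Spec_truncate_tokens_optimized_py tokens max_length special_tokens (truncate_tokens_optimized_py tokens max_length special_tokens)

-- ===== LEMMAS AND PROOFS =====

/-- Characterisation of A's loop: keep every `p`-token, and the first `m` non-`p` tokens. -/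
def kf (p : Int → Bool) : List Int → Int → List Int
  | [], _ => []
  | x :: t, m =>
    if p x then x :: kf p t m
    else if 0 < m then x :: kf p t (m - 1)
    else kf p t m

/-- Position of the `m`-th (0-based) non-`p` token, or the length if there is none. -/
def cutIdx (p : Int → Bool) : List Int → Nat → Nat
  | [], _ => 0
  | x :: t, m =>
    if p x then cutIdx p t m + 1
    else match m with
      | 0 => 0
      | m' + 1 => cutIdx p t m' + 1

theorem kf_nonpos (p : Int → Bool) (t : List Int) (m : Int) (h : m ≤ 0) :
    kf p t m = t.filter p := by
  induction t generalizing m with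
  | nil => rfl
  | cons x t ih =>
    simp only [kf, List.filter]
    cases hx : p x <;> simp [hx, ih m h, if_neg (by omega : ¬ 0 < m)]

theorem countP_p_not (p : Int → Bool) (t : List Int) :
    t.countP p + t.countP (fun x => !p x) = t.length := by
  induction t with
  | nil => rfl
  | cons x t ih => cases hx : p x <;> simp [hx, ← ih] <;> omega

theorem sum_count (p : Int → Bool) (t : List Int) : ∀ c : Int,
    t.foldl (fun acc token => if p token then acc + 1 else acc) c = c + (t.countP p : Int) := by
  induction t with
  | nil => simp
  | cons x t ih =>
    intro c
    cases hx : p x <;> simp [hx, ih] <;> ring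

theorem loopA (p : Int → Bool) (k : Int) (t : List Int) : ∀ (res : List Int) (c : Int),
    (t.foldl (fun (st : List Int × Int) token =>
        if p token then (st.1 ++ [token], st.2)
        else if st.2 < k then (st.1 ++ [token], st.2 + 1)
        else st) (res, c)).1 = res ++ kf p t (k - c) := by
  induction t with
  | nil => simp [kf]
  | cons x t ih =>
    intro res c
    simp only [List.foldl_cons, kf]
    cases hx : p x with
    | true => simp [hx, ih]
    | false =>
      by_cases hc : c < k
      · rw [if_neg (by simp [hx]), if_pos hc, ih, if_pos (by omega : (0:Int) < k - c)]
        simp [show k - (c + 1) = k - c - 1 by ring]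
      · rw [if_neg (by simp [hx]), if_neg hc, ih, if_neg (by omega : ¬ (0:Int) < k - c)]
        simp

theorem kf_toNat (p : Int → Bool) (t : List Int) (k : Int) :
    kf p t k = kf p t ((k.toNat : Nat) : Int) := by
  by_cases h : 0 ≤ k
  · rw [Int.toNat_of_nonneg h]
  · rw [kf_nonpos p t k (by omega), kf_nonpos p t _ (by omega)]

/-- `kf` keeps the prefix up to the cutoff position and filters the rest. -/
theorem kf_take (p : Int → Bool) (t : List Int) : ∀ m : Nat,
    kf p t (m : Int) = t.take (cutIdx p t m) ++ (t.drop (cutIdx p t m)).filter p := by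
  induction t with
  | nil => intro m; rfl
  | cons x t ih =>
    intro m
    cases hx : p x with
    | true => simp [kf, cutIdx, hx, ih m]
    | false =>
      cases m with
      | zero => simpa [kf, cutIdx, hx] using kf_nonpos p t 0 le_rfl
      | succ m' =>
        have h1 : ((m' + 1 : Nat) : Int) - 1 = (m' : Int) := by push_cast; ring
        simp [kf, cutIdx, hx, h1, ih m']

/-- Number of non-special positions collected by B. -/
theorem ns_length (p : Int → Bool) (t : List Int) : ∀ s : Int,
    (((PySem.List.enumerate t s).filter (fun it => !p it.2)).map (fun it => it.1)).length
      = t.countP (fun x => !p x) := by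
  induction t with
  | nil => intro s; simp [PySem.List.enumerate_nil]
  | cons x t ih =>
    intro s
    cases hx : p x <;>
      simp [PySem.List.enumerate_cons, List.filter, hx, ih (s + 1)]

/-- B's cutoff equals `s + cutIdx`. -/
theorem cutoff_eq (p : Int → Bool) (t : List Int) : ∀ (m : Nat) (s : Int),
    (if ((m : Nat) : Int) <
          ((((PySem.List.enumerate t s).filter (fun it => !p it.2)).map (fun it => it.1)).length : Int)
      then (PySem.List.pyGet?
              (((PySem.List.enumerate t s).filter (fun it => !p it.2)).map (fun it => it.1))
              ((m : Nat) : Int)).getD 0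
      else s + (t.length : Int))
    = s + ((cutIdx p t m : Nat) : Int) := by
  induction t with
  | nil => intro m s; simp [PySem.List.enumerate_nil, cutIdx]
  | cons x t ih =>
    intro m s
    cases hx : p x with
    | true =>
      have h2 := ih m (s + 1)
      simp only [PySem.List.enumerate_cons, List.filter, hx, Bool.not_true, List.length_cons]
      rw [show cutIdx p (x :: t) m = cutIdx p t m + 1 from by simp [cutIdx, hx],
        show s + ((cutIdx p t m + 1 : Nat) : Int) = (s + 1) + ((cutIdx p t m : Nat) : Int) by
          push_cast; ring,
        show s + ((t.length + 1 : Nat) : Int) = (s + 1) + ((t.length : Nat) : Int) by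
          push_cast; ring]
      exact h2
    | false =>
      simp only [PySem.List.enumerate_cons, List.filter, hx, Bool.not_false, List.map_cons,
        List.length_cons]
      cases m with
      | zero =>
        rw [if_pos (by push_cast; omega)]
        simp [cutIdx, hx]
      | succ m' =>
        have h2 := ih m' (s + 1)
        rw [show cutIdx p (x :: t) (m' + 1) = cutIdx p t m' + 1 from by simp [cutIdx, hx],
          show s + ((cutIdx p t m' + 1 : Nat) : Int) = (s + 1) + ((cutIdx p t m' : Nat) : Int) by
            push_cast; ring, ← h2]
        by_cases hlt : ((m' : Nat) : Int) <
            ((((PySem.List.enumerate t (s+1)).filter (fun it => !p it.2)).map (fun it => it.1)).length : Int)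
        · rw [if_pos (by push_cast at hlt ⊢; omega), if_pos hlt]
          simp
        · rw [if_neg (by push_cast at hlt ⊢; omega), if_neg hlt]
          push_cast; ring

/-- If the index bound is already exhausted, B's filter keeps exactly the `p`-tokens. -/
theorem filterB_nonpos (p : Int → Bool) (t : List Int) : ∀ (s b : Int), b ≤ s →
    ((PySem.List.enumerate t s).filter (fun it => decide (it.1 < b) || p it.2)).map (fun it => it.2)
      = t.filter p := by
  induction t with
  | nil => intro s b _; simp [PySem.List.enumerate_nil]
  | cons x t ih =>
    intro s b hb
    have hd : decide (s < b) = false := by simp; omega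
    cases hx : p x <;>
      simp [PySem.List.enumerate_cons, List.filter, hx, hd, ih (s + 1) b (by omega)]

/-- B's index filter keeps the first `c` tokens and filters the rest. -/
theorem filterB (p : Int → Bool) (t : List Int) : ∀ (c : Nat) (s b : Int), b = s + (c : Int) →
    ((PySem.List.enumerate t s).filter
        (fun it => decide (it.1 < b) || p it.2)).map (fun it => it.2)
      = t.take c ++ (t.drop c).filter p := by
  induction t with
  | nil => intro c s b _; simp [PySem.List.enumerate_nil]
  | cons x t ih =>
    intro c s b hb
    cases c with
    | zero =>
      simp only [List.take_zero, List.drop_zero, List.nil_append]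
      exact filterB_nonpos p (x :: t) s b (by push_cast at hb; omega)
    | succ c' =>
      have hd : decide (s < b) = true := by simp; push_cast at hb; omega
      have h2 := ih c' (s + 1) b (by push_cast at hb ⊢; omega)
      simp [PySem.List.enumerate_cons, List.filter_cons, hd, h2]

-- ===== VERDICT =====
theorem truncate_tokens_optimized_py_spec : Claim_equal_truncate_tokens_optimized_py := by
  intro tokens max_length special_tokens _
  unfold Spec_truncate_tokens_optimized_py
  simp only [truncate_tokens_optimized_py, truncate_tokens_optimized_py_alt]
  by_cases h : (tokens.length : Int) ≤ max_length
  · simp [h]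
  · rw [if_neg h, if_neg h]
    set p : Int → Bool := PySem.Set.contains (PySem.Set.ofList special_tokens) with hp
    rw [loopA p _ tokens [] 0, sum_count]
    simp only [List.nil_append, sub_zero, zero_add]
    set k : Int := max_length - (tokens.countP p : Int) with hk
    have hns := ns_length p tokens 0
    set ns : List Int :=
      ((PySem.List.enumerate tokens).filter (fun it => !p it.2)).map (fun it => it.1) with hnsdef
    have hkeep : max 0 ((ns.length : Int) - ((tokens.length : Int) - max_length)) = ((k.toNat : Nat) : Int) := by
      have hct := countP_p_not p tokens
      rw [hns]
      omega
    rw [hkeep]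
    have hcut := cutoff_eq p tokens k.toNat 0
    rw [← hnsdef] at hcut
    simp only [zero_add] at hcut
    have hfB := filterB p tokens (cutIdx p tokens k.toNat) 0
      (if ((k.toNat : Nat) : Int) < (ns.length : Int)
        then (PySem.List.pyGet? ns ((k.toNat : Nat) : Int)).getD 0 else ((tokens.length : Nat) : Int))
      (by rw [hcut]; omega)
    rw [hfB, kf_toNat p tokens k, kf_take p tokens k.toNat]
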